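-- pv_equiv track=rewrite | github.com/A1ex-Chen/DL_project_log | statistics-and-data-driven/basic-math/linear_algebra/알고리즘으로_배우는_선형대수/code/my_linear_algebra_l_bidiag.py | l_bidiag
-- ===== SOURCE A (Python) =====
-- def l_bidiag(A):
--     """
--     lower bidiagonal 행렬
--     입력값: 행렬 A
--     출력값: 행렬 A의 lower bidiagonal 행렬 res
--     """
--     n = len(A)
--     p = len(A[0])
--     res = []
--     for i in range(0, n):
--         row = []
--         for j in range(0, p):
--             if i < j or i - j > 1:
--                 row.append(0)
--             else:
--                 row.append(A[i][j])
--         res.append(row)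
--     return res
-- ===== SOURCE B (Python) =====
-- def l_bidiag(A):
--     n = len(A)
--     p = len(A[0])
--     res = [[0] * p for _ in range(n)]
--     for i in range(n):
--         if i < p:
--             res[i][i] = A[i][i]
--         if 0 <= i - 1 < p:
--             res[i][i - 1] = A[i][i - 1]
--     return res
-- ===== Notes on version B (the rewrite author's own statement) =====
-- stated objective: simpler
-- what changed: B allocates an n-by-p zero matrix once and then writes only the diagonal and subdiagonal entry of each row, instead of deciding a branch for every one of the n*p cells.
import Mathlib
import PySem

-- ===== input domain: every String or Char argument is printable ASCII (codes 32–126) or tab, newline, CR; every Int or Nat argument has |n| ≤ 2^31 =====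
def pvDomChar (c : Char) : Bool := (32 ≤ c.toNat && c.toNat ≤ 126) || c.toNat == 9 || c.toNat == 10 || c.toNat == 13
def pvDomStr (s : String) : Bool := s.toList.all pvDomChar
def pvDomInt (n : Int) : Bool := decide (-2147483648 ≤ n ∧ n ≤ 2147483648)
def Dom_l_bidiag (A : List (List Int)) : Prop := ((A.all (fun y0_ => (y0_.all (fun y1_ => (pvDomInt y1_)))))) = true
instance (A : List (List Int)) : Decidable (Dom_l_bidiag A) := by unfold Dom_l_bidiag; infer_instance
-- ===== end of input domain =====

-- B allocates the n×p zero matrix once and writes only the two band entries of each row,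
-- instead of A's per-cell branch over all n*p entries (objective: simpler).

-- ===== PORT A =====
-- literal port of A: for i in range(n): row = []; for j in range(p): append 0 or A[i][j]; res.append(row)
def l_bidiag (A : List (List Int)) : List (List Int) :=
  let n := A.length
  let p := ((A.headD []).length)
  (List.range n).foldl (fun res (i : Nat) =>
    res ++ [(List.range p).foldl (fun row (j : Nat) =>
      row ++ [if (i : Int) < (j : Int) ∨ (i : Int) - (j : Int) > 1 then 0
              else (A.getD i []).getD j 0]) []]) []

-- ===== PORT B =====
-- literal port of Source B: res = n fresh zero rows of length p; then for i in range(n):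
-- if i < p: res[i][i] = A[i][i]; if 0 <= i-1 < p: res[i][i-1] = A[i][i-1]
def l_bidiag_alt (A : List (List Int)) : List (List Int) :=
  let n := A.length
  let p := ((A.headD []).length)
  (List.range n).foldl (fun res (i : Nat) =>
    let res1 := if i < p then res.modify i (fun row => row.set i ((A.getD i []).getD i 0)) else res
    if 1 ≤ i ∧ i - 1 < p then res1.modify i (fun row => row.set (i - 1) ((A.getD i []).getD (i - 1) 0))
    else res1)
    (List.replicate n (List.replicate p 0))

-- ===== PRECONDITION & SPEC =====
-- Pre_ excludes exactly the inputs on which Python A raises IndexError: the empty matrix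
-- (len(A[0])) and ragged matrices whose row i is too short for a needed band entry A[i][i] or A[i][i-1].
def Pre_l_bidiag (A : List (List Int)) : Prop :=
  A ≠ [] ∧ ∀ i < A.length,
    (i < (A.headD []).length → i < (A.getD i []).length) ∧
    (1 ≤ i → i - 1 < (A.headD []).length → i - 1 < (A.getD i []).length)
instance (A : List (List Int)) : Decidable (Pre_l_bidiag A) := by unfold Pre_l_bidiag; infer_instance

def pvWitness_l_bidiag : List (List Int) := [[1, 2, 3], [4, 5, 6], [7, 8, 9]]

def Spec_l_bidiag (A : List (List Int)) (out : List (List Int)) : Prop := out = l_bidiag_alt A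
instance (A : List (List Int)) (out : List (List Int)) : Decidable (Spec_l_bidiag A out) := by unfold Spec_l_bidiag; infer_instance

-- ===== CLAIM (what is proved, stated in full; the proofs are below) =====
def Claim_equal_l_bidiag : Prop := ∀ (A : List (List Int)), Dom_l_bidiag A → Pre_l_bidiag A → Spec_l_bidiag A (l_bidiag A)

-- ===== LEMMAS AND PROOFS =====

-- A's cell value at (i, j)
def pvCell (A : List (List Int)) (i j : Nat) : Int :=
  if (i : Int) < (j : Int) ∨ (i : Int) - (j : Int) > 1 then 0 else (A.getD i []).getD j 0

-- one iteration of B's loop body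
def pvStep (A : List (List Int)) (p : Nat) (res : List (List Int)) (i : Nat) : List (List Int) :=
  let res1 := if i < p then res.modify i (fun row => row.set i ((A.getD i []).getD i 0)) else res
  if 1 ≤ i ∧ i - 1 < p then res1.modify i (fun row => row.set (i - 1) ((A.getD i []).getD (i - 1) 0))
  else res1

-- B's loop body applied to a single row r
def pvRowOf (A : List (List Int)) (p i : Nat) (r : List Int) : List Int :=
  if 1 ≤ i ∧ i - 1 < p then
    (if i < p then r.set i ((A.getD i []).getD i 0) else r).set (i - 1) ((A.getD i []).getD (i - 1) 0)
  else (if i < p then r.set i ((A.getD i []).getD i 0) else r)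

-- B's finished row i
def pvRowB (A : List (List Int)) (p i : Nat) : List Int :=
  pvRowOf A p i (List.replicate p 0)

lemma pvA_as_map (A : List (List Int)) :
    l_bidiag A = (List.range A.length).map
      (fun i => (List.range (A.headD []).length).map (pvCell A i)) := by
  simp only [l_bidiag]
  rw [PySem.List.foldl_append_singleton_eq_map]
  refine List.map_congr_left (fun i _ => ?_)
  rw [PySem.List.foldl_append_singleton_eq_map]
  rfl

lemma pvModify_map_range {α : Type} (n m : Nat) (g : Nat → α) (h : α → α) (hm : m < n) :
    ((List.range n).map g).modify m h
      = (List.range n).map (fun k => if k = m then h (g m) else g k) := by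
  apply List.ext_getElem
  · simp [List.length_modify]
  · intro k hk1 hk2
    have hkn : k < n := by simpa [List.length_modify] using hk1
    rw [List.getElem_modify]
    simp only [List.getElem_map, List.getElem_range]
    by_cases hkm : k = m
    · subst hkm; simp
    · simp [hkm, Ne.symm hkm]

lemma pvStep_map (A : List (List Int)) (p n m : Nat) (hmn : m < n) (g : Nat → List Int) :
    pvStep A p ((List.range n).map g) m
      = (List.range n).map (fun k => if k = m then pvRowOf A p m (g m) else g k) := by
  unfold pvStep pvRowOf
  by_cases h2 : 1 ≤ m ∧ m - 1 < p <;> by_cases h1 : m < p <;>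
    simp only [h1, h2, and_self, if_true, if_false]
  · rw [pvModify_map_range n m g _ hmn, pvModify_map_range n m _ _ hmn]
    refine List.map_congr_left (fun k _ => ?_)
    by_cases hkm : k = m <;> simp [hkm]
  · rw [pvModify_map_range n m g _ hmn]
  · rw [pvModify_map_range n m g _ hmn]
  · refine (List.map_congr_left (fun k _ => ?_)).symm
    by_cases hkm : k = m <;> simp [hkm]

lemma pvB_as_map (A : List (List Int)) :
    l_bidiag_alt A = (List.range A.length).map (pvRowB A (A.headD []).length) := by
  have hfold : l_bidiag_alt A
      = (List.range A.length).foldl (pvStep A ((A.headD []).length))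
          (List.replicate A.length (List.replicate ((A.headD []).length) 0)) := rfl
  rw [hfold]
  generalize (A.headD []).length = p
  suffices h : ∀ m, m ≤ A.length →
      (List.range m).foldl (pvStep A p)
        (List.replicate A.length (List.replicate p 0))
      = (List.range A.length).map
          (fun k => if k < m then pvRowB A p k else List.replicate p 0) by
    rw [h A.length le_rfl]
    refine List.map_congr_left (fun k hk => ?_)
    simp [List.mem_range.mp hk]
  intro m hm
  induction m with
  | zero => simp
  | succ m ih =>
      have hmn : m < A.length := hm
      rw [List.range_succ, List.foldl_append, ih (Nat.le_of_succ_le hm),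
          List.foldl_cons, List.foldl_nil, pvStep_map A p _ m hmn]
      refine List.map_congr_left (fun k hk => ?_)
      by_cases hkm : k = m
      · subst hkm
        simp [pvRowB]
      · have h' : (k < m + 1) ↔ (k < m) := by omega
        simp [hkm, h']

lemma pvRow_eq (A : List (List Int)) (p i : Nat) :
    (List.range p).map (pvCell A i) = pvRowB A p i := by
  apply List.ext_getElem
  · simp only [List.length_map, List.length_range, pvRowB, pvRowOf]
    split_ifs <;> simp
  · intro j hj1 hj2
    have hjp : j < p := by simpa using hj1
    simp only [List.getElem_map, List.getElem_range, pvCell, pvRowB, pvRowOf]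
    by_cases h2 : 1 ≤ i ∧ i - 1 < p <;> by_cases h1 : i < p <;>
      simp only [h1, h2, and_self, if_true, if_false,
                 List.getElem_set, List.getElem_replicate]
    all_goals split_ifs <;> first
      | rfl
      | omega
      | simp_all

-- ===== VERDICT (by name: the statement is the Claim_ definition above) =====
theorem l_bidiag_spec : Claim_equal_l_bidiag := by
  intro A _ _
  unfold Spec_l_bidiag
  rw [pvA_as_map, pvB_as_map]
  exact List.map_congr_left (fun i _ => pvRow_eq A _ i)
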